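-- pv_equiv track=rewrite | github.com/MartimRego/45game | solver.py | _compress_score_actions
-- ===== SOURCE A (Python) =====
-- def _compress_score_actions(pairs: list[tuple[int, str]]) -> list[tuple[int, int, str]]:
--     """Compress (score, action_name) into contiguous ranges with identical action."""
--
--     if not pairs:
--         return []
--
--     pairs.sort(key=lambda t: t[0])
--     out: list[tuple[int, int, str]] = []
--
--     start_s, start_a = pairs[0]
--     prev_s = start_s
--
--     for s, a in pairs[1:]:
--         if a == start_a and s == prev_s + 1:
--             prev_s = s
--             continue
--
--         out.append((start_s, prev_s, start_a))
--         start_s, start_a = s, a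
--         prev_s = s
--
--     out.append((start_s, prev_s, start_a))
--     return out
-- ===== SOURCE B (Python) =====
-- def _compress_score_actions(pairs: list[tuple[int, str]]) -> list[tuple[int, int, str]]:
--     """Compress (score, action_name) into contiguous ranges with identical action.
--
--     Traverses the sorted list back-to-front, merging each pair into the head
--     range of the output when it extends it downward."""
--     pairs.sort(key=lambda t: t[0])
--     out: list[tuple[int, int, str]] = []
--     for s, a in reversed(pairs):
--         if out and out[0][2] == a and out[0][0] == s + 1:
--             out[0] = (s, out[0][1], a)
--         else:
--             out.insert(0, (s, s, a))
--     return out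
-- ===== Notes on version B (the rewrite author's own statement) =====
-- stated objective: alternative
-- what changed: Replaces A's forward scan with start/prev run-state and a flush-on-break accumulator by a backward traversal that merges each pair into the head range of the output, so no run state is tracked at all.
import Mathlib
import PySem

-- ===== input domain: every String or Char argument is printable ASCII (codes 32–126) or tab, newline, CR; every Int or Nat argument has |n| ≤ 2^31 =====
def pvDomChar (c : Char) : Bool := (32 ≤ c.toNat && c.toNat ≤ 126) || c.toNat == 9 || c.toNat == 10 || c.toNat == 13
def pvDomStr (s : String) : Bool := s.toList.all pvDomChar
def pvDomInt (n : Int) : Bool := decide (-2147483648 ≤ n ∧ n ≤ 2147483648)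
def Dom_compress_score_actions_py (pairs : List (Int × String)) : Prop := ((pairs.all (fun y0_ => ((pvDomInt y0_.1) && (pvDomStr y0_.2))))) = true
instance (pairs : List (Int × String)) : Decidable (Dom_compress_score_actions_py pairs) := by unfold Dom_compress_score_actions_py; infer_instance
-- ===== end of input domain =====

-- B traverses the sorted list back-to-front, merging each pair into the head run of the
-- output (no start/prev state) — a different decomposition of the same compression; both
-- A and B sort the argument in place, the equivalence proved is about the return value.

-- ===== PORT A =====
-- loop body of A's for-loop, state = (out, start_s, start_a, prev_s)
def pvStepA (st : List (Int × Int × String) × Int × String × Int) (p : Int × String) :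
    List (Int × Int × String) × Int × String × Int :=
  if p.2 == st.2.2.1 && p.1 == st.2.2.2 + 1 then
    (st.1, st.2.1, st.2.2.1, p.1)
  else
    (st.1 ++ [(st.2.1, st.2.2.2, st.2.2.1)], p.1, p.2, p.1)

def compress_score_actions_py (pairs : List (Int × String)) : List (Int × Int × String) :=
  if pairs.isEmpty then []
  else
    match PySem.List.sorted pairs (fun t => t.1) false with
    | [] => []
    | (s0, a0) :: rest =>
      let st := rest.foldl pvStepA ([], s0, a0, s0)
      st.1 ++ [(st.2.1, st.2.2.2, st.2.2.1)]

-- ===== PORT B =====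
-- body of B's reversed-order loop: merge one pair into the current head range
def pvMergeDown (p : Int × String) (out : List (Int × Int × String)) : List (Int × Int × String) :=
  match out with
  | (lo, hi, a') :: rest =>
      if a' == p.2 && lo == p.1 + 1 then (p.1, hi, a') :: rest
      else (p.1, p.1, p.2) :: (lo, hi, a') :: rest
  | [] => [(p.1, p.1, p.2)]

def compress_score_actions_py_alt (pairs : List (Int × String)) : List (Int × Int × String) :=
  (PySem.List.sorted pairs (fun t => t.1) false).foldr pvMergeDown []

-- ===== PRECONDITION & SPEC =====
def Spec_compress_score_actions_py (pairs : List (Int × String)) (out : List (Int × Int × String)) : Prop := out = compress_score_actions_py_alt pairs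
instance (pairs : List (Int × String)) (out : List (Int × Int × String)) : Decidable (Spec_compress_score_actions_py pairs out) := by unfold Spec_compress_score_actions_py; infer_instance

-- ===== CLAIM (what is proved, stated in full; the proofs are below) =====
def Claim_equal_compress_score_actions_py : Prop := ∀ (pairs : List (Int × String)), Dom_compress_score_actions_py pairs → Spec_compress_score_actions_py pairs (compress_score_actions_py pairs)

-- ===== LEMMAS AND PROOFS =====

-- generalisation of pvMergeDown to an arbitrary pending range (ss..ps, a)
def pvMerge (ss ps : Int) (a : String) (out : List (Int × Int × String)) : List (Int × Int × String) :=
  match out with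
  | (lo, hi, a') :: rest =>
      if a' == a && lo == ps + 1 then (ss, hi, a') :: rest
      else (ss, ps, a) :: (lo, hi, a') :: rest
  | [] => [(ss, ps, a)]

theorem pvStepA_eq (out : List (Int × Int × String)) (ss ps s : Int) (a x : String) :
    pvStepA (out, ss, a, ps) (s, x) =
      if x == a && s == ps + 1 then (out, ss, a, s) else (out ++ [(ss, ps, a)], s, x, s) := rfl

theorem pvMergeDown_eq (s : Int) (x : String) (L : List (Int × Int × String)) :
    pvMergeDown (s, x) L = pvMerge s s x L := by
  cases L with
  | nil => rfl
  | cons h t => obtain ⟨lo, hi, a'⟩ := h; simp [pvMergeDown, pvMerge]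

theorem pvMerge_absorb (ss ps s : Int) (a : String) (L : List (Int × Int × String))
    (hs : s = ps + 1) : pvMerge ss ps a (pvMerge s s a L) = pvMerge ss s a L := by
  subst hs
  cases L with
  | nil => simp [pvMerge]
  | cons h t =>
    obtain ⟨lo, hi, a'⟩ := h
    by_cases h1 : a' = a ∧ lo = (ps + 1) + 1
    · simp [pvMerge, h1.1, h1.2]
    · have h1' : ¬ (a' == a && lo == (ps + 1) + 1) = true := by
        simp only [Bool.and_eq_true, beq_iff_eq]; exact fun ⟨u, v⟩ => h1 ⟨u, v⟩
      simp [pvMerge, h1']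

theorem pvMerge_skip (ss ps s : Int) (a x : String) (L : List (Int × Int × String))
    (h : ¬ (x = a ∧ s = ps + 1)) :
    pvMerge ss ps a (pvMerge s s x L) = (ss, ps, a) :: pvMerge s s x L := by
  have hx : ¬ (x == a && s == ps + 1) = true := by
    simp only [Bool.and_eq_true, beq_iff_eq]; exact fun ⟨u, v⟩ => h ⟨u, v⟩
  cases L with
  | nil => simp [pvMerge, hx]
  | cons hd t =>
    obtain ⟨lo, hi, a'⟩ := hd
    by_cases h1 : a' = x ∧ lo = s + 1
    · simp [pvMerge, h1.1, h1.2]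
      exact fun u v => h ⟨u, v⟩
    · have h1' : ¬ (a' == x && lo == s + 1) = true := by
        simp only [Bool.and_eq_true, beq_iff_eq]; exact fun ⟨u, v⟩ => h1 ⟨u, v⟩
      simp [pvMerge, h1', hx]

-- A's left fold, with its final flush, equals `out ++` B's right fold prefixed by the pending range
theorem pvFold_eq (rest : List (Int × String)) :
    ∀ (out : List (Int × Int × String)) (ss : Int) (a : String) (ps : Int),
    (rest.foldl pvStepA (out, ss, a, ps)).1 ++
      [((rest.foldl pvStepA (out, ss, a, ps)).2.1,
        (rest.foldl pvStepA (out, ss, a, ps)).2.2.2,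
        (rest.foldl pvStepA (out, ss, a, ps)).2.2.1)]
      = out ++ pvMerge ss ps a (rest.foldr pvMergeDown []) := by
  induction rest with
  | nil => intro out ss a ps; simp [pvMerge]
  | cons p rest ih =>
    intro out ss a ps
    obtain ⟨s, x⟩ := p
    rw [List.foldl_cons, List.foldr_cons, pvStepA_eq, pvMergeDown_eq]
    by_cases hc : x = a ∧ s = ps + 1
    · have hb : (x == a && s == ps + 1) = true := by simp [hc.1, hc.2]
      rw [if_pos hb, ih, hc.1, pvMerge_absorb _ _ _ _ _ hc.2]
    · have hb : ¬ (x == a && s == ps + 1) = true := by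
        simp only [Bool.and_eq_true, beq_iff_eq]; exact fun ⟨u, v⟩ => hc ⟨u, v⟩
      rw [if_neg hb, ih, pvMerge_skip _ _ _ _ _ _ hc, List.append_assoc,
        List.singleton_append]

theorem pv_main (pairs : List (Int × String)) :
    compress_score_actions_py pairs = compress_score_actions_py_alt pairs := by
  unfold compress_score_actions_py compress_score_actions_py_alt
  by_cases hp : pairs = []
  · subst hp; simp [PySem.List.sorted]
  · have hne : pairs.isEmpty = false := by simpa using hp
    rw [hne]
    have hperm := PySem.List.sorted_perm (xs := pairs) (key := fun t : Int × String => t.1) (rev := false)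
    have hsne : PySem.List.sorted pairs (fun t => t.1) false ≠ [] := by
      intro h; exact hp (List.Perm.eq_nil (h ▸ hperm).symm)
    simp only [Bool.false_eq_true, if_false]
    cases hs : PySem.List.sorted pairs (fun t => t.1) false with
    | nil => exact absurd hs hsne
    | cons p rest =>
      obtain ⟨s0, a0⟩ := p
      rw [List.foldr_cons, pvMergeDown_eq]
      exact (pvFold_eq rest [] s0 a0 s0).trans (by rw [List.nil_append])

-- ===== VERDICT (by name: the statement is the Claim_ definition above) =====
theorem compress_score_actions_py_spec : Claim_equal_compress_score_actions_py := by
  intro pairs _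
  unfold Spec_compress_score_actions_py
  exact pv_main pairs
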